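-- pv_equiv track=rewrite | github.com/cma2015/iwa-miRNA | Source_code/moduleii/scripts/HTcriteria.py | seq_table
-- ===== SOURCE A (Python) =====
-- def seq_table(seq_info, mature_se, star_se):
--     out_raw = '<tr>'
--     tmp_seq = seq_info[0]
--     if mature_se[0] < star_se[0]:
--         seq_td = '<td>{}<span style="background-color: #DE3025">{}</span>{}<span style="background-color: #257ADE">{}</span>{}</td>'.format(
--         tmp_seq[0:mature_se[0]], tmp_seq[mature_se[0]:mature_se[1]],tmp_seq[mature_se[1]:star_se[0]],
--         tmp_seq[star_se[0]:star_se[1]],tmp_seq[star_se[1]:])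
--     else:
--         seq_td = '<td>{}<span style="background-color: #257ADE">{}</span>{}<span style="background-color: #DE3025">{}</span>{}</td>'.format(
--         tmp_seq[0:star_se[0]], tmp_seq[star_se[0]:star_se[1]],tmp_seq[star_se[1]:mature_se[0]],
--         tmp_seq[mature_se[0]:mature_se[1]],tmp_seq[mature_se[1]:])
--     out_raw += seq_td
--     for kk in seq_info[1:]:
--         out_raw += '<td >{}</td>'.format(kk)
--     out_raw += '</tr>'
--     return out_raw
-- ===== SOURCE B (Python) =====
-- def seq_table(seq_info, mature_se, star_se):
--     seq = seq_info[0]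
--     # star region listed first so that a stable sort keeps it first on equal starts
--     regions = [(star_se[0], star_se[1], '#257ADE'), (mature_se[0], mature_se[1], '#DE3025')]
--     regions.sort(key=lambda r: r[0])
--     parts = ['<tr>', '<td>']
--     prev = 0
--     for s, e, color in regions:
--         parts.append(seq[prev:s])
--         parts.append('<span style="background-color: {}">{}</span>'.format(color, seq[s:e]))
--         prev = e
--     parts.append(seq[prev:])
--     parts.append('</td>')
--     for kk in seq_info[1:]:
--         parts.append('<td >{}</td>'.format(kk))
--     parts.append('</tr>')
--     return ''.join(parts)
-- ===== Notes on version B (the rewrite author's own statement) =====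
-- stated objective: alternative
-- what changed: Replaces the two hard-coded five-slot templates with a single cursor loop over the two colored regions sorted by start (star first on ties), collecting pieces in a list joined once.
import Mathlib
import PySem

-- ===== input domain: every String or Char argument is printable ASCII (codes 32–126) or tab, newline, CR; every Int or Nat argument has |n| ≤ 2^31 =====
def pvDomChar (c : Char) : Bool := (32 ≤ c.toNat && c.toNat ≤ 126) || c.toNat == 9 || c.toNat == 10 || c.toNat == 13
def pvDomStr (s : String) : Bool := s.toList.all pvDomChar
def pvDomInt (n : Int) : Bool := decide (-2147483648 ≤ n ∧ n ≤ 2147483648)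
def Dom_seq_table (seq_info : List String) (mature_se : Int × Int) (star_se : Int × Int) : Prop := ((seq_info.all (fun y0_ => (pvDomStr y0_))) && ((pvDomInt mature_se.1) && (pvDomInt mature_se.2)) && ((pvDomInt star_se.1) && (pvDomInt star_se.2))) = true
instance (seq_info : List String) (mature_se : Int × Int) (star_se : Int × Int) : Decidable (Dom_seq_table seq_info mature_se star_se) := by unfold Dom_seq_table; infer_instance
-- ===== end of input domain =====

-- B replaces A's two hard-coded five-slot HTML templates by one cursor loop over the
-- two colored regions sorted by start (star first on ties), joining collected pieces once (objective: alternative).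


-- ===== PORT A =====
def seq_table (seq_info : List String) (mature_se : Int × Int) (star_se : Int × Int) : String :=
  let tmp_seq := PySem.List.pyGetD seq_info 0 ""   -- seq_info[0]; Pre_ guarantees seq_info ≠ []
  ((PySem.List.slice seq_info (some 1) none).foldl
      (fun acc kk => acc ++ ("<td >" ++ kk ++ "</td>"))
      ("<tr>" ++
        (if mature_se.1 < star_se.1 then
          "<td>" ++ PySem.Str.slice tmp_seq (some 0) (some mature_se.1)
            ++ "<span style=\"background-color: #DE3025\">"
            ++ PySem.Str.slice tmp_seq (some mature_se.1) (some mature_se.2)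
            ++ "</span>" ++ PySem.Str.slice tmp_seq (some mature_se.2) (some star_se.1)
            ++ "<span style=\"background-color: #257ADE\">"
            ++ PySem.Str.slice tmp_seq (some star_se.1) (some star_se.2)
            ++ "</span>" ++ PySem.Str.slice tmp_seq (some star_se.2) none ++ "</td>"
        else
          "<td>" ++ PySem.Str.slice tmp_seq (some 0) (some star_se.1)
            ++ "<span style=\"background-color: #257ADE\">"
            ++ PySem.Str.slice tmp_seq (some star_se.1) (some star_se.2)
            ++ "</span>" ++ PySem.Str.slice tmp_seq (some star_se.2) (some mature_se.1)
            ++ "<span style=\"background-color: #DE3025\">"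
            ++ PySem.Str.slice tmp_seq (some mature_se.1) (some mature_se.2)
            ++ "</span>" ++ PySem.Str.slice tmp_seq (some mature_se.2) none ++ "</td>")))
    ++ "</tr>"

-- ===== PORT B =====
def seq_table_alt (seq_info : List String) (mature_se : Int × Int) (star_se : Int × Int) : String :=
  let seq := PySem.List.pyGetD seq_info 0 ""   -- seq_info[0]; Pre_ guarantees seq_info ≠ []
  let st :=
    (PySem.List.sorted
        [((star_se.1, star_se.2, "#257ADE") : Int × Int × String),
         (mature_se.1, mature_se.2, "#DE3025")]
        (fun r => r.1)).foldl   -- stable sort: star first on equal starts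
      (fun (acc : List String × Int) r =>
        (acc.1 ++ [PySem.Str.slice seq (some acc.2) (some r.1),
                   "<span style=\"background-color: " ++ r.2.2 ++ "\">"
                     ++ PySem.Str.slice seq (some r.1) (some r.2.1) ++ "</span>"],
         r.2.1))
      (["<tr>", "<td>"], (0 : Int))
  PySem.Str.join ""
    (((PySem.List.slice seq_info (some 1) none).foldl
        (fun ps kk => ps ++ ["<td >" ++ kk ++ "</td>"])
        (st.1 ++ [PySem.Str.slice seq (some st.2) none, "</td>"]))
      ++ ["</tr>"])

-- ===== PRECONDITION & SPEC =====
-- Pre_ excludes only the empty seq_info, on which A raises IndexError at seq_info[0].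
def Pre_seq_table (seq_info : List String) (mature_se : Int × Int) (star_se : Int × Int) : Prop :=
  seq_info ≠ []
instance (seq_info : List String) (mature_se : Int × Int) (star_se : Int × Int) : Decidable (Pre_seq_table seq_info mature_se star_se) := by unfold Pre_seq_table; infer_instance
def pvWitness_seq_table : List String × (Int × Int) × (Int × Int) := (["ACGUACGU", "x"], (1, 3), (4, 6))
def Spec_seq_table (seq_info : List String) (mature_se : Int × Int) (star_se : Int × Int) (out : String) : Prop := out = seq_table_alt seq_info mature_se star_se
instance (seq_info : List String) (mature_se : Int × Int) (star_se : Int × Int) (out : String) : Decidable (Spec_seq_table seq_info mature_se star_se out) := by unfold Spec_seq_table; infer_instance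

-- ===== CLAIM (what is proved, stated in full; the proofs are below) =====
def Claim_equal_seq_table : Prop := ∀ (seq_info : List String) (mature_se : Int × Int) (star_se : Int × Int), Dom_seq_table seq_info mature_se star_se → Pre_seq_table seq_info mature_se star_se → Spec_seq_table seq_info mature_se star_se (seq_table seq_info mature_se star_se)

-- ===== LEMMAS AND PROOFS =====

theorem pv_sorted_pair (x y : Int × Int × String) :
    PySem.List.sorted [x, y] (fun r => r.1) = if y.1 < x.1 then [y, x] else [x, y] := by
  simp [PySem.List.sorted, PySem.List.insertBy]

theorem pv_join_nil : PySem.Str.join "" ([] : List String) = "" := by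
  simp [PySem.Str.join, PySem.Chars.join, List.intercalate]

theorem pv_join_cons (s : String) (l : List String) :
    PySem.Str.join "" (s :: l) = s ++ PySem.Str.join "" l := by
  cases l with
  | nil => simp [PySem.Str.join, PySem.Chars.join, List.intercalate]
  | cons b t =>
      simp [PySem.Str.join, PySem.Chars.join, List.intercalate, String.ofList_append]

theorem pv_join_append (l₁ l₂ : List String) :
    PySem.Str.join "" (l₁ ++ l₂) = PySem.Str.join "" l₁ ++ PySem.Str.join "" l₂ := by
  induction l₁ with
  | nil => simp [pv_join_nil]
  | cons a t ih => simp [pv_join_cons, ih, String.append_assoc]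

theorem pv_join_tail (ks : List String) (parts : List String) :
    PySem.Str.join "" (ks.foldl (fun ps kk => ps ++ ["<td >" ++ kk ++ "</td>"]) parts)
      = ks.foldl (fun acc kk => acc ++ ("<td >" ++ kk ++ "</td>")) (PySem.Str.join "" parts) := by
  induction ks generalizing parts with
  | nil => simp
  | cons k t ih =>
      simp only [List.foldl_cons, ih, pv_join_append, pv_join_cons, pv_join_nil]
      simp [String.append_assoc]

-- ===== VERDICT (by name: the statement is the Claim_ definition above) =====
theorem seq_table_spec : Claim_equal_seq_table := by
  intro si m s _ _
  unfold Spec_seq_table seq_table seq_table_alt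
  rw [pv_sorted_pair]
  by_cases h : m.1 < s.1
  · simp only [if_pos h, List.foldl_cons, List.foldl_nil, List.cons_append, List.nil_append, pv_join_tail, pv_join_append, pv_join_cons, pv_join_nil]
    simp [String.append_assoc]
  · simp only [if_neg h, List.foldl_cons, List.foldl_nil, List.cons_append, List.nil_append, pv_join_tail, pv_join_append, pv_join_cons, pv_join_nil]
    simp [String.append_assoc]
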